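-- pv_equiv track=rewrite | github.com/saiyash006/M0ST.AI | security_modules/reverse_engineering/cfg_recovery/__init__.py | compute_successors
-- ===== SOURCE A (Python) =====
-- from typing import Any, Dict, List, Set, Tuple
--
-- def compute_successors(
--     block_addrs: List[int], edges: List[Tuple[int, int]]
-- ) -> Dict[int, List[int]]:
--     """Compute successor map."""
--     succs: Dict[int, List[int]] = {b: [] for b in block_addrs}
--     for src, dst in edges:
--         if src in succs:
--             succs[src].append(dst)
--     return succs
-- ===== SOURCE B (Python) =====
-- from typing import Any, Dict, List, Set, Tuple
--
-- def compute_successors(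
--     block_addrs: List[int], edges: List[Tuple[int, int]]
-- ) -> Dict[int, List[int]]:
--     """Compute successor map: per-block rescan of the edge list."""
--     return {b: [dst for src, dst in edges if src == b] for b in block_addrs}
-- ===== Notes on version B (the rewrite author's own statement) =====
-- stated objective: alternative
-- what changed: Replaces A's init-then-single-indexed-pass over edges (mutating per-key lists) with a dict comprehension over the blocks, each key's list built by rescanning the whole edge list; the nesting is inverted.
import Mathlib
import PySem

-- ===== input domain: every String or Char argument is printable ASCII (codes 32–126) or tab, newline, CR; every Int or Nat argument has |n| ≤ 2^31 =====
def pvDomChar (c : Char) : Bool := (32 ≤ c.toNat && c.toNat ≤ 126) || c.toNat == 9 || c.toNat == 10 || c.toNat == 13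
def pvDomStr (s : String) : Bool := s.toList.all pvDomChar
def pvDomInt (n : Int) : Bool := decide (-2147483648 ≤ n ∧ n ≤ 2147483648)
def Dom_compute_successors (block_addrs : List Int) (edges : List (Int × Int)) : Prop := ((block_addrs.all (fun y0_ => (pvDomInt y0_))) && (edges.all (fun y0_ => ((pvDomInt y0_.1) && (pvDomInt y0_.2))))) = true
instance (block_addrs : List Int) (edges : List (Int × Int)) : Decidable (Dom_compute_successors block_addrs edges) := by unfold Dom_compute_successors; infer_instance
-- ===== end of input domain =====

-- B inverts A's traversal: instead of one indexed pass over the edges appending into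
-- per-key lists, B builds each block's successor list by rescanning the whole edge
-- list (dict comprehension over the blocks). Objective: alternative decomposition.

-- ===== PORT A =====
def compute_successors (block_addrs : List Int) (edges : List (Int × Int)) : List (Int × List Int) :=
  let succs : PySem.Dict Int (List Int) :=
    block_addrs.foldl (fun d b => d.insert b []) PySem.Dict.empty
  let succs :=
    edges.foldl
      (fun d e => if d.contains e.1 then d.modify e.1 [] (fun L => L ++ [e.2]) else d)
      succs
  succs.items

-- ===== PORT B =====
def compute_successors_alt (block_addrs : List Int) (edges : List (Int × Int)) : List (Int × List Int) :=
  (block_addrs.foldl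
    (fun d b => d.insert b ((edges.filter (fun e => e.1 == b)).map (·.2)))
    (PySem.Dict.empty : PySem.Dict Int (List Int))).items

-- ===== PRECONDITION & SPEC =====
def Spec_compute_successors (block_addrs : List Int) (edges : List (Int × Int)) (out : List (Int × List Int)) : Prop := out = compute_successors_alt block_addrs edges
instance (block_addrs : List Int) (edges : List (Int × Int)) (out : List (Int × List Int)) : Decidable (Spec_compute_successors block_addrs edges out) := by unfold Spec_compute_successors; infer_instance

-- ===== CLAIM (what is proved, stated in full; the proofs are below) =====
def Claim_equal_compute_successors : Prop := ∀ (block_addrs : List Int) (edges : List (Int × Int)), Dom_compute_successors block_addrs edges → Spec_compute_successors block_addrs edges (compute_successors block_addrs edges)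

-- ===== LEMMAS AND PROOFS =====

-- A's init loop: every key present maps to [], lookups elsewhere fall through.
theorem getD_init_loop (bas : List Int) (d : PySem.Dict Int (List Int)) (c : Int) :
    (bas.foldl (fun d b => d.insert b ([] : List Int)) d).getD c [] =
      if c ∈ bas then [] else d.getD c [] := by
  induction bas generalizing d with
  | nil => simp
  | cons b bas ih =>
    simp only [List.foldl_cons, ih, PySem.Dict.getD_insert, List.mem_cons]
    by_cases hb : c = b <;> by_cases hm : c ∈ bas <;> simp [hb, hm]

-- B's loop: each key maps to its (key-determined) value.
theorem getD_B_loop (bas : List Int) (v : Int → List Int) (d : PySem.Dict Int (List Int)) (c : Int) :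
    (bas.foldl (fun d b => d.insert b (v b)) d).getD c [] =
      if c ∈ bas then v c else d.getD c [] := by
  induction bas generalizing d with
  | nil => simp
  | cons b bas ih =>
    simp only [List.foldl_cons, ih, PySem.Dict.getD_insert, List.mem_cons]
    by_cases hb : c = b <;> by_cases hm : c ∈ bas <;> simp [hb, hm]

-- A's edge loop: keys unchanged, and each contained key's list grows by the matching dsts.
theorem edge_loop_keys (l : List (Int × Int)) (d : PySem.Dict Int (List Int)) :
    (l.foldl (fun d e => if d.contains e.1 then d.modify e.1 [] (fun L => L ++ [e.2]) else d) d).keys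
      = d.keys := by
  induction l generalizing d with
  | nil => rfl
  | cons e l ih =>
    simp only [List.foldl_cons]
    by_cases hc : d.contains e.1 = true
    · rw [hc]; simp only [if_true, ih, PySem.Dict.keys_modify]
      exact PySem.Dict.keys_insert_of_contains _ _ hc
    · simp [hc, ih]

theorem edge_loop_getD (l : List (Int × Int)) (d : PySem.Dict Int (List Int)) (c : Int) :
    (l.foldl (fun d e => if d.contains e.1 then d.modify e.1 [] (fun L => L ++ [e.2]) else d) d).getD c []
      = d.getD c [] ++ (l.filter (fun e => d.contains e.1 && e.1 == c)).map (·.2) := by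
  induction l generalizing d with
  | nil => simp
  | cons e l ih =>
    simp only [List.foldl_cons]
    by_cases hc : d.contains e.1 = true
    · rw [hc]
      simp only [if_true, ih, PySem.Dict.getD_modify]
      have hck : ∀ x : Int, (d.modify e.1 [] (fun L => L ++ [e.2])).contains x = d.contains x := by
        intro x
        rw [PySem.Dict.contains_modify]
        by_cases hx : x = e.1
        · simp [hx, hc]
        · simp [hx]
      simp only [hck]
      by_cases he : e.1 = c
      · subst he; simp [hc, List.append_assoc]
      · have hce : ¬ c = e.1 := fun h => he h.symm
        have : (e.1 == c) = false := by simp [he]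
        simp [hc, this, hce]
    · have hc' : d.contains e.1 = false := by simpa using hc
      simp [hc', ih]

theorem compute_successors_spec : Claim_equal_compute_successors := by
  intro bas edges _
  unfold Spec_compute_successors compute_successors compute_successors_alt
  set dA := bas.foldl (fun d b => d.insert b ([] : List Int)) PySem.Dict.empty with hdA
  set v : Int → List Int := fun b => (edges.filter (fun e => e.1 == b)).map (·.2) with hv
  set dB := bas.foldl (fun d b => d.insert b (v b)) PySem.Dict.empty with hdB
  set dA2 := edges.foldl (fun d e => if d.contains e.1 then d.modify e.1 [] (fun L => L ++ [e.2]) else d) dA with hdA2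
  show dA2.items = dB.items
  have hkA : dA.keys = PySem.Set.ofList bas := by
    rw [hdA, PySem.Dict.keys_foldl_insert]
    rw [show (PySem.Dict.empty : PySem.Dict Int (List Int)).keys = [] from rfl,
        PySem.Set.update_nil_left]
  have hkB : dB.keys = PySem.Set.ofList bas := by
    rw [hdB, PySem.Dict.keys_foldl_insert]
    rw [show (PySem.Dict.empty : PySem.Dict Int (List Int)).keys = [] from rfl,
        PySem.Set.update_nil_left]
  have hkA2 : dA2.keys = dA.keys := edge_loop_keys ..
  have hndA2 : dA2.keys.Nodup := by rw [hkA2, hkA]; exact PySem.Set.nodup_ofList bas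
  have hndB : dB.keys.Nodup := by rw [hkB]; exact PySem.Set.nodup_ofList bas
  rw [PySem.Dict.items_eq_map_keys dA2 hndA2 ([] : List Int),
      PySem.Dict.items_eq_map_keys dB hndB ([] : List Int), hkA2, hkA, ← hkB]
  apply List.map_congr_left
  intro k hk
  have hkbas : k ∈ bas := by
    rw [hkB] at hk; exact (PySem.Set.mem_ofList bas k).mp hk
  have hcontA : ∀ c : Int, dA.contains c = true ↔ c ∈ bas := by
    intro c
    rw [PySem.Dict.contains_iff_mem_keys, hkA]
    exact PySem.Set.mem_ofList bas c
  have hA2 : dA2.getD k [] = v k := by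
    rw [hdA2, edge_loop_getD, getD_init_loop]
    have hfil : edges.filter (fun e => dA.contains e.1 && e.1 == k)
        = edges.filter (fun e => e.1 == k) := by
      apply List.filter_congr
      intro e _
      by_cases he : e.1 = k
      · have hck : dA.contains k = true := (hcontA k).mpr hkbas
        simp [he, hck]
      · simp [he]
    simp [hkbas, hfil, hv]
  have hB : dB.getD k [] = v k := by
    rw [hdB, getD_B_loop]
    simp [hkbas]
  rw [hA2, hB]
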